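-- pv_equiv track=rewrite | github.com/laochendeai/10uzs | hft_signal_generator.py | _confirm_short_term_breakout
-- ===== SOURCE A (Python) =====
-- from typing import Optional, List, Deque, Dict
--
-- def _confirm_short_term_breakout(ticks: Deque[Dict], direction: Optional[str]) -> bool:
--     if not direction or len(ticks) < 4:
--         return False
--     recent = list(ticks)[-4:]
--     if direction == 'long':
--         return all(recent[i]['price'] >= recent[i - 1]['price'] for i in range(1, len(recent)))
--     else:
--         return all(recent[i]['price'] <= recent[i - 1]['price'] for i in range(1, len(recent)))
-- ===== SOURCE B (Python) =====
-- def _confirm_short_term_breakout(ticks, direction):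
--     if not direction or len(ticks) < 4:
--         return False
--     prices = [t['price'] for t in list(ticks)[-4:]]
--     if direction == 'long':
--         return prices == sorted(prices)
--     return prices == sorted(prices, reverse=True)
-- ===== Notes on version B (the rewrite author's own statement) =====
-- stated objective: idiomatic
-- what changed: B extracts the last-4 prices once and compares the list with its sorted (resp. reverse-sorted) copy instead of A's index-based adjacent-pairwise scan.
import Mathlib
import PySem

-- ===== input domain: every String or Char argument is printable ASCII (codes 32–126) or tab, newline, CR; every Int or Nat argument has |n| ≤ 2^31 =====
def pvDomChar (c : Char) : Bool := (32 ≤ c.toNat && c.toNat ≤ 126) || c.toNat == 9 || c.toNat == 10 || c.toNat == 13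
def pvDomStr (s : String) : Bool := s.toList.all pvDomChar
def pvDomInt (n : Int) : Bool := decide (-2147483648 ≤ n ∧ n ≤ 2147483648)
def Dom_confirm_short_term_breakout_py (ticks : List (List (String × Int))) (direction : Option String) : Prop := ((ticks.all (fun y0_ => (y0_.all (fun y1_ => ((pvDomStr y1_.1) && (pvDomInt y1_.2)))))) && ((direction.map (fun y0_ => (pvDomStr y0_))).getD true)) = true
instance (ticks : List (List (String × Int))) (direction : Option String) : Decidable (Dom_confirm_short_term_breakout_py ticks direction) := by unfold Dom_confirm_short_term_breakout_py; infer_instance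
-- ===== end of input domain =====

-- B replaces A's adjacent-pairwise scan by extracting the last-4 prices once and
-- comparing the list with its sorted (resp. reverse-sorted) copy (objective: idiomatic).

-- ===== PORT A =====
-- t['price'] : first-match lookup in the assoc list (Python dict access); KeyError (none) is excluded by Pre_,
-- so the port reads the value with .getD 0 (never reached with none under Pre_).
def pvGetPrice : List (String × Int) → Option Int
  | [] => none
  | (k, v) :: rest => if k == "price" then some v else pvGetPrice rest

def confirm_short_term_breakout_py (ticks : List (List (String × Int))) (direction : Option String) : Bool :=
  if direction = none ∨ direction = some "" ∨ ticks.length < 4 then false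
  else
    let recent := PySem.List.slice ticks (some (-4)) none
    if direction = some "long" then
      (PySem.List.pyRange 1 recent.length 1).all (fun i =>
        decide ((pvGetPrice (PySem.List.pyGetD recent i [])).getD 0 ≥
                (pvGetPrice (PySem.List.pyGetD recent (i - 1) [])).getD 0))
    else
      (PySem.List.pyRange 1 recent.length 1).all (fun i =>
        decide ((pvGetPrice (PySem.List.pyGetD recent i [])).getD 0 ≤
                (pvGetPrice (PySem.List.pyGetD recent (i - 1) [])).getD 0))

-- ===== PORT B =====
def confirm_short_term_breakout_py_alt (ticks : List (List (String × Int))) (direction : Option String) : Bool :=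
  if direction = none ∨ direction = some "" ∨ ticks.length < 4 then false
  else
    let prices := (PySem.List.slice ticks (some (-4)) none).map (fun t => (pvGetPrice t).getD 0)
    if direction = some "long" then
      decide (prices = PySem.List.sorted prices (fun x => x) false)
    else
      decide (prices = PySem.List.sorted prices (fun x => x) true)

-- ===== PRECONDITION & SPEC =====
-- Pre_ excludes exactly the inputs where A raises KeyError: the guards pass but one of the
-- last four ticks has no "price" key (B raises there too).
def Pre_confirm_short_term_breakout_py (ticks : List (List (String × Int))) (direction : Option String) : Prop :=
  direction = none ∨ direction = some "" ∨ ticks.length < 4 ∨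
    ∀ t ∈ ticks.drop (ticks.length - 4), (t.lookup "price").isSome
instance (ticks : List (List (String × Int))) (direction : Option String) : Decidable (Pre_confirm_short_term_breakout_py ticks direction) := by unfold Pre_confirm_short_term_breakout_py; infer_instance

def pvWitness_confirm_short_term_breakout_py : (List (List (String × Int))) × Option String :=
  ([[("price", 1)], [("price", 2)], [("price", 2)], [("price", 5)]], some "long")

def Spec_confirm_short_term_breakout_py (ticks : List (List (String × Int))) (direction : Option String) (out : Bool) : Prop := out = confirm_short_term_breakout_py_alt ticks direction
instance (ticks : List (List (String × Int))) (direction : Option String) (out : Bool) : Decidable (Spec_confirm_short_term_breakout_py ticks direction out) := by unfold Spec_confirm_short_term_breakout_py; infer_instance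

-- ===== CLAIM (what is proved, stated in full; the proofs are below) =====
def Claim_equal_confirm_short_term_breakout_py : Prop := ∀ (ticks : List (List (String × Int))) (direction : Option String), Dom_confirm_short_term_breakout_py ticks direction → Pre_confirm_short_term_breakout_py ticks direction → Spec_confirm_short_term_breakout_py ticks direction (confirm_short_term_breakout_py ticks direction)

-- ===== LEMMAS AND PROOFS =====

-- a four-element list is a literal
theorem pv_len4 {α : Type} (xs : List α) (h : xs.length = 4) :
    ∃ a b c d, xs = [a, b, c, d] := by
  match xs, h with
  | [a, b, c, d], _ => exact ⟨a, b, c, d, rfl⟩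

-- [a,b,c,d] equals its own stable sort iff it is weakly increasing
theorem pv_sorted4_iff (a b c d : Int) :
    ([a, b, c, d] = PySem.List.sorted [a, b, c, d] (fun x => x) false) ↔
      (a ≤ b ∧ b ≤ c ∧ c ≤ d) := by
  constructor
  · intro h
    have hp := PySem.List.sorted_pairwise (xs := [a, b, c, d]) (key := fun x => x)
    rw [← h] at hp
    simp [List.pairwise_cons] at hp
    omega
  · rintro ⟨h1, h2, h3⟩
    exact (PySem.List.sorted_eq_self_of_pairwise [a,b,c,d] (fun x => x) (by
      simp [List.pairwise_cons]; omega)).symm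

-- [a,b,c,d] equals its own reverse stable sort iff it is weakly decreasing
theorem pv_sorted4_rev_iff (a b c d : Int) :
    ([a, b, c, d] = PySem.List.sorted [a, b, c, d] (fun x => x) true) ↔
      (b ≤ a ∧ c ≤ b ∧ d ≤ c) := by
  constructor
  · intro h
    have hp := PySem.List.sorted_pairwise_rev (xs := [a, b, c, d]) (key := fun x => x)
    rw [← h] at hp
    simp [List.pairwise_cons] at hp
    omega
  · rintro ⟨h1, h2, h3⟩
    exact (PySem.List.sorted_rev_eq_self_of_pairwise [a,b,c,d] (fun x => x) (by
      simp [List.pairwise_cons]; omega)).symm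

-- ===== VERDICT (by name: the statement is the Claim_ definition above) =====
theorem confirm_short_term_breakout_py_spec : Claim_equal_confirm_short_term_breakout_py := by
  intro ticks direction _ _
  unfold Spec_confirm_short_term_breakout_py
  unfold confirm_short_term_breakout_py confirm_short_term_breakout_py_alt
  by_cases hg : direction = none ∨ direction = some "" ∨ ticks.length < 4
  · simp [hg]
  · simp only [hg, if_false]
    have hlen : ¬ ticks.length < 4 := by tauto
    have hslice : PySem.List.slice ticks (some (-4)) none = ticks.drop (ticks.length - 4) :=
      PySem.List.slice_from_neg_ofNat ticks 4 (by omega)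
    have hl4 : (PySem.List.slice ticks (some (-4)) none).length = 4 := by
      rw [hslice]; simp; omega
    obtain ⟨t0, t1, t2, t3, hrec⟩ := pv_len4 _ hl4
    rw [hrec]
    have hr : PySem.List.pyRange 1 (([t0,t1,t2,t3] : List (List (String × Int))).length : Int) 1 = [1, 2, 3] := by
      simp only [List.length_cons, List.length_nil]
      decide
    by_cases hd : direction = some "long"
    · simp only [hd, if_true, hr, List.map_cons, List.map_nil]
      simp only [pv_sorted4_iff]
      simp [PySem.List.pyGetD, ge_iff_le]
    · simp only [hd, if_false, hr, List.map_cons, List.map_nil]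
      simp only [pv_sorted4_rev_iff]
      simp [PySem.List.pyGetD]
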